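-- pv_equiv track=rewrite | github.com/rajeshpaddy/gitttest | python/words.py | string_replace
-- ===== SOURCE A (Python) =====
-- def string_replace(s,replace_with):
--     '''
--     function to replace a " " character in string with another character
--     args
--     s:string to be searched for " " and replace with <replacewith>
--     replace_with: the string to be replaced with
--     '''
--     h=""
--     for c in s:
--         if c==" ":
--             h+=replace_with
--         else:
--             h+=c
--     return h
-- ===== SOURCE B (Python) =====
-- def string_replace(s, replace_with):
--     return replace_with.join(s.split(" "))
-- ===== Notes on version B (the rewrite author's own statement) =====
-- stated objective: idiomatic
-- what changed: Replaces the character-by-character accumulation loop with a two-phase tokenize-then-join: split s on the space character and join the fragments with replace_with.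
import Mathlib
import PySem

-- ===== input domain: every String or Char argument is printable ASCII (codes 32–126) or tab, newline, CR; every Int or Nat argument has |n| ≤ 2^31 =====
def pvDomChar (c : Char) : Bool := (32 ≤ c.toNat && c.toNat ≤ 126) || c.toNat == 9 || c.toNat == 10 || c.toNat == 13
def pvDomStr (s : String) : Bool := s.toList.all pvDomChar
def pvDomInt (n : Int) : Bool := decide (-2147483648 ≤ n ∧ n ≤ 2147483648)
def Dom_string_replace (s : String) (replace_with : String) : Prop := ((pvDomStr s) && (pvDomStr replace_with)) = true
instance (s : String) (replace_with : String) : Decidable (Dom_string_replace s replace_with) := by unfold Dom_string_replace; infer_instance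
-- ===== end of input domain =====

-- B replaces A's char-by-char accumulation loop with an idiomatic split-on-space / join-with-replacement two-phase pass.

-- ===== PORT A =====
-- A accumulates into h, appending replace_with for each space and the char otherwise
-- (string concatenation ported on List Char, exact).
def string_replace (s : String) (replace_with : String) : String :=
  String.ofList
    (s.toList.foldl
      (fun h c => if c == ' ' then h ++ replace_with.toList else h ++ [c]) [])

-- ===== PORT B =====
-- Source B: return replace_with.join(s.split(" ")); split(" ") has a nonempty separator so
-- PySem.Str.split? is always some — getD [] only discharges the option.
def string_replace_alt (s : String) (replace_with : String) : String :=
  PySem.Str.join replace_with ((PySem.Str.split? s " ").getD [])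

-- ===== PRECONDITION & SPEC =====
def Spec_string_replace (s : String) (replace_with : String) (out : String) : Prop := out = string_replace_alt s replace_with
instance (s : String) (replace_with : String) (out : String) : Decidable (Spec_string_replace s replace_with out) := by unfold Spec_string_replace; infer_instance

-- ===== CLAIM (what is proved, stated in full; the proofs are below) =====
def Claim_equal_string_replace : Prop := ∀ (s : String) (replace_with : String), Dom_string_replace s replace_with → Spec_string_replace s replace_with (string_replace s replace_with)

-- ===== LEMMAS AND PROOFS =====

-- the per-character replacement, written back-to-front (proof-side characterisation)
def pvRep (r : List Char) : List Char → List Char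
  | [] => []
  | c :: rest => (if c == ' ' then r else [c]) ++ pvRep r rest

-- splitOn [' '] written as a simple recursion carrying the pending fragment prefix
def pvSplit (pre : List Char) : List Char → List (List Char)
  | [] => [pre]
  | c :: rest => if c == ' ' then pre :: pvSplit [] rest else pvSplit (pre ++ [c]) rest

theorem pvSplit_ne_nil (pre l : List Char) : pvSplit pre l ≠ [] := by
  induction l generalizing pre with
  | nil => simp [pvSplit]
  | cons c rest ih =>
    simp only [pvSplit]
    split <;> simp [ih]

theorem pvFoldl_eq (r : List Char) (l a : List Char) :
    l.foldl (fun h c => if c == ' ' then h ++ r else h ++ [c]) a = a ++ pvRep r l := by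
  induction l generalizing a with
  | nil => simp [pvRep]
  | cons c rest ih =>
    simp only [List.foldl_cons, pvRep, ih]
    split <;> simp

theorem pvGo_eq (l : List Char) :
    ∀ (fuel : Nat), l.length < fuel → ∀ (cur : List Char) (acc : List (List Char)),
      PySem.Chars.splitOn.go [' '] fuel l cur acc = acc.reverse ++ pvSplit cur.reverse l := by
  induction l with
  | nil =>
    intro fuel hf cur acc
    match fuel with
    | fuel + 1 => simp [PySem.Chars.splitOn.go, pvSplit]
  | cons c rest ih =>
    intro fuel hf cur acc
    match fuel with
    | fuel + 1 =>
      simp only [PySem.Chars.splitOn.go]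
      by_cases h : c = ' '
      · subst h
        simp only [List.isPrefixOf, BEq.rfl, Bool.true_and, if_pos]
        rw [show List.drop [' '].length (' ' :: rest) = rest from rfl,
          ih fuel (by simpa using hf) [] (_ :: acc)]
        simp [pvSplit]
      · have hp : [' '].isPrefixOf (c :: rest) = false := by
          simp [List.isPrefixOf]
          exact fun hc => absurd hc.symm h
        rw [hp]
        simp only [Bool.false_eq_true, if_false]
        rw [ih fuel (by simpa using hf) (c :: cur) acc]
        simp [pvSplit, h]

theorem pvJoin_pvSplit (r : List Char) (l : List Char) :
    ∀ pre, PySem.Chars.join r (pvSplit pre l) = pre ++ pvRep r l := by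
  induction l with
  | nil => intro pre; simp [pvSplit, pvRep, PySem.Chars.join_singleton]
  | cons c rest ih =>
    intro pre
    by_cases h : c = ' '
    · subst h
      simp only [pvSplit]
      rw [if_pos (by decide)]
      obtain ⟨p, ps, hps⟩ : ∃ p ps, pvSplit ([] : List Char) rest = p :: ps := by
        cases hsp : pvSplit ([] : List Char) rest with
        | nil => exact absurd hsp (pvSplit_ne_nil _ _)
        | cons p ps => exact ⟨p, ps, rfl⟩
      rw [hps, PySem.Chars.join_cons_cons, ← hps, ih]
      simp [pvRep]
    · simp only [pvSplit, pvRep]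
      rw [if_neg (by simpa using h), if_neg (by simpa using h), ih]
      simp

-- ===== VERDICT (by name: the statement is the Claim_ definition above) =====
theorem string_replace_spec : Claim_equal_string_replace := by
  intro s replace_with _
  unfold Spec_string_replace string_replace string_replace_alt
  rw [PySem.Str.split?]
  have hsep : (" ".toList) = [' '] := rfl
  simp only [hsep, PySem.Chars.split?, List.isEmpty, Bool.false_eq_true, if_false,
    Option.map_some, Option.getD_some]
  rw [PySem.Str.join]
  congr 1
  rw [PySem.Chars.splitOn]
  rw [pvGo_eq s.toList (s.toList.length + 1) (by omega) [] []]
  simp only [List.reverse_nil, List.nil_append, List.map_map]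
  have hmap : (pvSplit [] s.toList).map (String.toList ∘ String.ofList)
      = pvSplit [] s.toList := by
    simp [Function.comp_def]
  rw [hmap, pvJoin_pvSplit]
  simpa using pvFoldl_eq replace_with.toList s.toList []
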